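-- pv_equiv track=rewrite | github.com/Vasilispapg/CVML-GoalNet | utils.py | get_clip_information
-- ===== SOURCE A (Python) =====
-- def get_clip_information(clip_intervals: list[list[int]], importances: list[int]) -> tuple[list]:
--     '''
--         Parameters:
--             clip_intervals. Contains the intervals of each clip from a temporally segmented video. Each interval is expressed as a list containing two integers, where the former integer is the initial index of the video, and the latter integer is the final index of the video. The indexing function is defined on the corresponding full video.
--             importances. Contains the importance of each frame from a full video.
--
--         Returns:
--             clip_importance. Each item holds the importance of the corresponding clip.
--             clip_length. Each item holds the length of the corresponding clip.
--     '''
--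
--     full_n_frames = len(importances)
--     clip_importances = []
--     clip_lengths = []
--     for clip_interval in clip_intervals:
--         importances_slice = importances[clip_interval[0]:clip_interval[1]]
--         clip_importances.append(sum(importances_slice))
--         clip_lengths.append(len(importances_slice))
--
--     return clip_importances, clip_lengths, clip_intervals
-- ===== SOURCE B (Python) =====
-- def get_clip_information(clip_intervals, importances):
--     n = len(importances)
--     prefix = [0]
--     for v in importances:
--         prefix.append(prefix[-1] + v)
--
--     def clamp(i):
--         if i < 0:
--             i += n
--         return 0 if i < 0 else (n if i > n else i)
--
--     clip_importances = []
--     clip_lengths = []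
--     for iv in clip_intervals:
--         lo = clamp(iv[0])
--         hi = clamp(iv[1])
--         if hi < lo:
--             hi = lo
--         clip_importances.append(prefix[hi] - prefix[lo])
--         clip_lengths.append(hi - lo)
--     return clip_importances, clip_lengths, clip_intervals
-- ===== Notes on version B (the rewrite author's own statement) =====
-- stated objective: faster
-- what changed: B builds a prefix-sum array once and answers each clip with an O(1) clamped range difference instead of materialising and summing a slice per clip.
import Mathlib
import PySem

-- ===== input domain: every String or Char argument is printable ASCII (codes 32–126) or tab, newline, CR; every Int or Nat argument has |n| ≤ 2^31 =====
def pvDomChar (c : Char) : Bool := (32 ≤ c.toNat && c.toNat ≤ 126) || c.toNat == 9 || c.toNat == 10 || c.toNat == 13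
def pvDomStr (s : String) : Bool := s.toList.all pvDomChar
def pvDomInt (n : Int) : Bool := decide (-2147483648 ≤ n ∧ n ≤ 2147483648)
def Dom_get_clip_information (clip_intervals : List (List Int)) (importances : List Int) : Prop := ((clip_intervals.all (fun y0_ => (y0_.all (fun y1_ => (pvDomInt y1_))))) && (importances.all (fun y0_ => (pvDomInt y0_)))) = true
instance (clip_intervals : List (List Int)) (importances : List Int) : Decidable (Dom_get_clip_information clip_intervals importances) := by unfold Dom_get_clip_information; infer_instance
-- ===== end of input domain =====

-- B replaces the per-clip slice-and-sum with a single prefix-sum array and O(1) clamped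
-- range differences per clip (asymptotically faster, O(n+k) vs O(k*n)).

-- ===== PORT A =====
-- per-clip step: slice importances[iv[0]:iv[1]], append its sum and its length
def get_clip_information (clip_intervals : List (List Int)) (importances : List Int) : List Int × List Int × List (List Int) :=
  let r := clip_intervals.foldl (fun (acc : List Int × List Int) iv =>
    let s := PySem.List.slice importances (some (PySem.List.pyGetD iv 0 0)) (some (PySem.List.pyGetD iv 1 0))
    (acc.1 ++ [s.sum], acc.2 ++ [(s.length : Int)])) ([], [])
  (r.1, r.2, clip_intervals)

-- ===== PORT B =====
-- prefix[k] = sum of the first k importances (Source B's running-sum loop)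
def pvPrefix (c : Int) : List Int → List Int
  | [] => [c]
  | x :: xs => c :: pvPrefix (c + x) xs

-- Source B's clamp: Python slice-bound clamping of index i into [0, n]
def pvClamp (n : Nat) (i : Int) : Nat :=
  let i := if i < 0 then i + n else i
  if i < 0 then 0 else if i > (n : Int) then n else i.toNat

def get_clip_information_alt (clip_intervals : List (List Int)) (importances : List Int) : List Int × List Int × List (List Int) :=
  let n := importances.length
  let pref := pvPrefix 0 importances
  let r := clip_intervals.foldl (fun (acc : List Int × List Int) iv =>
    let lo := pvClamp n (PySem.List.pyGetD iv 0 0)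
    let hi0 := pvClamp n (PySem.List.pyGetD iv 1 0)
    let hi := if hi0 < lo then lo else hi0
    (acc.1 ++ [pref.getD hi 0 - pref.getD lo 0], acc.2 ++ [((hi - lo : Nat) : Int)])) ([], [])
  (r.1, r.2, clip_intervals)

-- ===== PRECONDITION & SPEC =====
-- Python A raises IndexError on any interval with fewer than two entries (iv[0]/iv[1]); exactly those inputs are excluded.
def Pre_get_clip_information (clip_intervals : List (List Int)) (importances : List Int) : Prop :=
  ∀ iv ∈ clip_intervals, 2 ≤ iv.length
instance (clip_intervals : List (List Int)) (importances : List Int) : Decidable (Pre_get_clip_information clip_intervals importances) := by unfold Pre_get_clip_information; infer_instance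

def pvWitness_get_clip_information : List (List Int) × List Int := ([[0, 2], [-3, 5]], [1, 2, 3])

def Spec_get_clip_information (clip_intervals : List (List Int)) (importances : List Int) (out : List Int × List Int × List (List Int)) : Prop := out = get_clip_information_alt clip_intervals importances
instance (clip_intervals : List (List Int)) (importances : List Int) (out : List Int × List Int × List (List Int)) : Decidable (Spec_get_clip_information clip_intervals importances out) := by unfold Spec_get_clip_information; infer_instance

-- ===== CLAIM (what is proved, stated in full; the proofs are below) =====
def Claim_equal_get_clip_information : Prop := ∀ (clip_intervals : List (List Int)) (importances : List Int), Dom_get_clip_information clip_intervals importances → Pre_get_clip_information clip_intervals importances → Spec_get_clip_information clip_intervals importances (get_clip_information clip_intervals importances)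

-- ===== LEMMAS AND PROOFS =====

lemma pvClamp_eq_clampIdx (n : Nat) (i : Int) : pvClamp n i = PySem.List.clampIdx n i := by
  simp only [pvClamp, PySem.List.clampIdx]
  split_ifs <;> omega

lemma pvPrefix_getD (xs : List Int) (c : Int) (k : Nat) (hk : k ≤ xs.length) :
    (pvPrefix c xs).getD k 0 = c + (xs.take k).sum := by
  induction xs generalizing c k with
  | nil =>
    have : k = 0 := by simpa using hk
    subst this; simp [pvPrefix]
  | cons x xs ih =>
    cases k with
    | zero => simp [pvPrefix]
    | succ k =>
      simp only [pvPrefix, List.getD_cons_succ, List.take_succ_cons, List.sum_cons]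
      rw [ih _ _ (by simpa using hk)]; ring

lemma slice_sum_length (imp : List Int) (a b : Int) :
    let lo := PySem.List.clampIdx imp.length a
    let hi0 := PySem.List.clampIdx imp.length b
    let hi := if hi0 < lo then lo else hi0
    let s := PySem.List.slice imp (some a) (some b)
    s.sum = (imp.take hi).sum - (imp.take lo).sum ∧ s.length = hi - lo := by
  intro lo hi0 hi s
  have hlo : lo ≤ imp.length := PySem.List.clampIdx_le imp.length a
  have hhi0 : hi0 ≤ imp.length := PySem.List.clampIdx_le imp.length b
  have hhi : hi ≤ imp.length := by simp only [hi]; split_ifs <;> omega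
  have hlohi : lo ≤ hi := by simp only [hi]; split_ifs <;> omega
  have hs : s = (imp.drop lo).take (hi - lo) := by
    show PySem.List.slice imp (some a) (some b) = _
    simp only [PySem.List.slice]
    have : hi0 - lo = hi - lo := by simp only [hi]; split_ifs <;> omega
    rw [this]
  have htake : imp.take hi = imp.take lo ++ (imp.drop lo).take (hi - lo) := by
    rw [← List.take_add]
    congr 1
    omega
  constructor
  · rw [hs, htake] at *
    simp [List.sum_append]
  · rw [hs]
    simp only [List.length_take, List.length_drop]
    omega

lemma step_eq (imp : List Int) (acc : List Int × List Int) (iv : List Int) :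
    (let s := PySem.List.slice imp (some (PySem.List.pyGetD iv 0 0)) (some (PySem.List.pyGetD iv 1 0))
     (acc.1 ++ [s.sum], acc.2 ++ [(s.length : Int)]))
    = (let lo := pvClamp imp.length (PySem.List.pyGetD iv 0 0)
       let hi0 := pvClamp imp.length (PySem.List.pyGetD iv 1 0)
       let hi := if hi0 < lo then lo else hi0
       (acc.1 ++ [(pvPrefix 0 imp).getD hi 0 - (pvPrefix 0 imp).getD lo 0],
        acc.2 ++ [((hi - lo : Nat) : Int)])) := by
  set a := PySem.List.pyGetD iv 0 0
  set b := PySem.List.pyGetD iv 1 0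
  have h := slice_sum_length imp a b
  simp only [pvClamp_eq_clampIdx] at *
  set lo := PySem.List.clampIdx imp.length a with hlo'
  set hi0 := PySem.List.clampIdx imp.length b
  set hi := if hi0 < lo then lo else hi0 with hhi'
  have hlo : lo ≤ imp.length := PySem.List.clampIdx_le imp.length a
  have hhi0 : hi0 ≤ imp.length := PySem.List.clampIdx_le imp.length b
  have hhi : hi ≤ imp.length := by rw [hhi']; split_ifs <;> omega
  obtain ⟨h1, h2⟩ := h
  rw [pvPrefix_getD imp 0 hi hhi, pvPrefix_getD imp 0 lo hlo]
  simp only [zero_add]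
  congr 2
  · rw [h1]
  · rw [h2]

-- ===== VERDICT (by name: the statement is the Claim_ definition above) =====
theorem get_clip_information_spec : Claim_equal_get_clip_information := by
  intro ci imp _ _
  show _ = _
  simp only [get_clip_information, get_clip_information_alt]
  rw [PySem.List.foldl_congr_mem ci _ _ ([], [])
    (fun acc iv _ => step_eq imp acc iv)]
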